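-- pv_equiv track=rewrite | github.com/Vanixs/Hillel_python | Lessons_12/12.2.py | generate_cube_numbers
-- ===== SOURCE A (Python) =====
-- def generate_cube_numbers(end):
--     number = 2
--     while True:
--         cube = number ** 3
--         if cube > end:
--             return
--         yield cube
--         number += 1
-- ===== SOURCE B (Python) =====
-- def generate_cube_numbers(end):
--     # Compute the largest b with b**3 <= end by binary search, then yield
--     # the cubes of 2..b from a bounded range (no per-item cube test).
--     if end < 8:
--         return
--     lo, hi = 2, end
--     while lo < hi:
--         mid = (lo + hi + 1) // 2
--         if mid ** 3 <= end:
--             lo = mid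
--         else:
--             hi = mid - 1
--     for number in range(2, lo + 1):
--         yield number ** 3
-- ===== Notes on version B (the rewrite author's own statement) =====
-- stated objective: alternative
-- what changed: Replaces the unbounded while-loop that cube-tests each candidate with a binary search for the integer cube root of end, then yields cubes over a precomputed bounded range.
import Mathlib
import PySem

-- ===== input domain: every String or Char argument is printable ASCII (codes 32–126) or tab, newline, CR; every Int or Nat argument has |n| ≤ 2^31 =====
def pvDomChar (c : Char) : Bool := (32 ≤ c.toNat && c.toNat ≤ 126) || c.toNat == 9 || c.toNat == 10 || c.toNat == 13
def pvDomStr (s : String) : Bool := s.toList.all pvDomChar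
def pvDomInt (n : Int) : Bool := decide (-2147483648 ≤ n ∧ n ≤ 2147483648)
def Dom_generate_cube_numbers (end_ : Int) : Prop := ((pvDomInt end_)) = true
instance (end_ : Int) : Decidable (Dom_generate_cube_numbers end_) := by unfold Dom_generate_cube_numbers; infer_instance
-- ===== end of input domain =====

-- B replaces A's unbounded cube-testing loop by a binary search for the integer
-- cube root followed by a bounded range of cubes (alternative decomposition, same cost).

-- ===== PORT A =====
-- A's while-loop: number starts at 2 and only increases, so it is carried as a Nat;
-- each step computes cube = number**3, stops when cube > end, else yields cube.
def pvGoA (end_ : Int) (number : Nat) : List Int :=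
  let cube : Int := (number : Int) ^ 3
  if cube > end_ then [] else cube :: pvGoA end_ (number + 1)
termination_by (end_ + 1 - number).toNat
decreasing_by
  rename_i h
  simp only [not_lt] at h
  have hx : (number : Int) ≤ (number : Int) ^ 3 := by
    rcases Nat.eq_zero_or_pos number with h0 | h0
    · simp [h0]
    · exact le_self_pow₀ (by exact_mod_cast h0) (by norm_num)
  omega

def generate_cube_numbers (end_ : Int) : List Int := pvGoA end_ 2

-- ===== PORT B =====
-- binary search: largest b in [lo, hi] with b**3 <= end (invariants supplied by caller)
def pvBsearch (end_ lo hi : Int) : Int :=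
  if lo < hi then
    let mid := PySem.Int.floordiv (lo + hi + 1) 2
    if mid ^ 3 ≤ end_ then pvBsearch end_ mid hi else pvBsearch end_ lo (mid - 1)
  else lo
termination_by (hi - lo).toNat
decreasing_by
  · rename_i hlt _
    have := PySem.Int.floordiv_eq_ediv_of_pos (a := lo + hi + 1) (b := 2) (by omega)
    omega
  · rename_i hlt _
    have := PySem.Int.floordiv_eq_ediv_of_pos (a := lo + hi + 1) (b := 2) (by omega)
    omega

def generate_cube_numbers_alt (end_ : Int) : List Int :=
  if end_ < 8 then []
  else (PySem.List.pyRange 2 (pvBsearch end_ 2 end_ + 1) 1).map (fun n => n ^ 3)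

-- ===== PRECONDITION & SPEC =====
def Spec_generate_cube_numbers (end_ : Int) (out : List Int) : Prop := out = generate_cube_numbers_alt end_
instance (end_ : Int) (out : List Int) : Decidable (Spec_generate_cube_numbers end_ out) := by unfold Spec_generate_cube_numbers; infer_instance

-- ===== CLAIM (what is proved, stated in full; the proofs are below) =====
def Claim_equal_generate_cube_numbers : Prop := ∀ (end_ : Int), Dom_generate_cube_numbers end_ → Spec_generate_cube_numbers end_ (generate_cube_numbers end_)

-- ===== LEMMAS AND PROOFS =====

-- cube is strictly monotone on the integers
theorem pvCube_lt_cube {x y : Int} (h : x < y) : x ^ 3 < y ^ 3 := by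
  nlinarith [sq_nonneg (x + y), sq_nonneg x, sq_nonneg y, sq_nonneg (x - y)]

-- the binary search returns the largest b in [lo, hi] with b^3 ≤ end_
theorem pvBsearch_correct (end_ : Int) : ∀ (k : Nat) (lo hi : Int), (hi - lo).toNat = k →
    lo ≤ hi → lo ^ 3 ≤ end_ → end_ < (hi + 1) ^ 3 →
    lo ≤ pvBsearch end_ lo hi ∧ pvBsearch end_ lo hi ≤ hi ∧
      (pvBsearch end_ lo hi) ^ 3 ≤ end_ ∧ end_ < (pvBsearch end_ lo hi + 1) ^ 3 := by
  intro k
  induction k using Nat.strong_induction_on with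
  | _ k ih =>
    intro lo hi hk hle hlo hhi
    rw [pvBsearch]
    by_cases hlt : lo < hi
    · simp only [hlt, if_true]
      have hmid := PySem.Int.floordiv_eq_ediv_of_pos (a := lo + hi + 1) (b := 2) (by omega)
      set mid := PySem.Int.floordiv (lo + hi + 1) 2 with hm
      have h1 : lo + 1 ≤ mid := by omega
      have h2 : mid ≤ hi := by omega
      by_cases hc : mid ^ 3 ≤ end_
      · simp only [hc, if_true]
        exact ⟨by linarith [(ih _ (by omega) mid hi rfl (by omega) hc hhi).1],
               (ih _ (by omega) mid hi rfl (by omega) hc hhi).2⟩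
      · simp only [hc, if_false]
        push Not at hc
        have := ih _ (by omega) lo (mid - 1) rfl ?_ hlo ?_
        · exact ⟨this.1, by omega, this.2.2⟩
        · -- lo ≤ mid - 1
          omega
        · -- end_ < ((mid - 1) + 1)^3
          simpa using hc
    · simp only [hlt, if_false]
      have : lo = hi := by omega
      subst this
      exact ⟨le_refl _, le_refl _, hlo, hhi⟩

-- A's loop from n produces exactly the cubes of the range n..b, where b is the
-- largest integer with b^3 ≤ end_.
theorem pvGoA_eq (end_ b : Int) (hb : b ^ 3 ≤ end_) (hb' : end_ < (b + 1) ^ 3) :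
    ∀ (k : Nat) (n : Nat), (b + 1 - n).toNat = k → (n : Int) ≤ b + 1 →
      pvGoA end_ n = (PySem.List.pyRange (n : Int) (b + 1) 1).map (fun x => x ^ 3) := by
  intro k
  induction k with
  | zero =>
    intro n hk hle
    have hnb : (n : Int) = b + 1 := by omega
    rw [pvGoA]
    simp only [hnb, gt_iff_lt, hb', if_true]
    rw [PySem.List.pyRange_one]
    simp
  | succ k ih =>
    intro n hk hle
    have hnb : (n : Int) ≤ b := by omega
    have hcube : (n : Int) ^ 3 ≤ end_ := by
      rcases lt_or_eq_of_le hnb with h | h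
      · exact le_trans (le_of_lt (pvCube_lt_cube h)) hb
      · rw [h]; exact hb
    rw [pvGoA]
    simp only [not_lt.mpr hcube]
    rw [PySem.List.pyRange_one_cons (by omega)]
    simp only [List.map_cons]
    have := ih (n + 1) (by omega) (by push_cast; omega)
    push_cast at this ⊢
    rw [this]

-- ===== VERDICT (by name: the statement is the Claim_ definition above) =====
theorem generate_cube_numbers_spec : Claim_equal_generate_cube_numbers := by
  intro end_ _
  unfold Spec_generate_cube_numbers generate_cube_numbers generate_cube_numbers_alt
  by_cases h8 : end_ < 8
  · simp only [h8, if_true]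
    rw [pvGoA]
    norm_num
    omega
  · simp only [h8, if_false]
    push Not at h8
    have hend : end_ < (end_ + 1) ^ 3 :=
      lt_of_lt_of_le (by omega) (le_self_pow₀ (by omega) (by norm_num))
    obtain ⟨h1, h2, h3, h4⟩ :=
      pvBsearch_correct end_ (end_ - 2).toNat 2 end_ rfl (by omega) (by norm_num; omega) hend
    have := pvGoA_eq end_ (pvBsearch end_ 2 end_) h3 h4 ((pvBsearch end_ 2 end_ + 1 - 2).toNat) 2 rfl (by push_cast; omega)
    push_cast at this
    exact this
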